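-- pv_equiv track=rewrite | github.com/thevibethinker/n5os-ode | N5/scripts/_DEPRECATED_2025-10-10/decisions_extractor.py | _categorize_decision
-- ===== SOURCE A (Python) =====
-- from typing import Dict, Any, List
--
-- def _categorize_decision(decision_text: str, meeting_info: Dict) -> str:
--     """Categorize the decision type."""
--     text_lower = decision_text.lower()
--
--     meeting_types = meeting_info.get('meeting_types', [])
--
--     # Strategic indicators
--     if any(word in text_lower for word in ['partner', 'strategy', 'approach', 'direction', 'vision', 'goal']):
--         return "Strategic"
--
--     # Product indicators
--     if any(word in text_lower for word in ['feature', 'product', 'build', 'develop', 'design', 'functionality']):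
--         return "Product"
--
--     # Resource allocation indicators
--     if any(word in text_lower for word in ['hire', 'budget', 'spend', 'invest', 'resource', 'allocate', 'cost']):
--         return "Resource Allocation"
--
--     # Process indicators
--     if any(word in text_lower for word in ['process', 'workflow', 'procedure', 'system', 'how we']):
--         return "Process"
--
--     # Default based on meeting type
--     if 'sales' in meeting_types:
--         return "Tactical"
--
--     return "Tactical"
-- ===== SOURCE B (Python) =====
-- # Single scan over the text: at each position, match every keyword with
-- # startswith and record its category; then return the highest-priority
-- # category seen (the 'meeting_types'/'sales' branch of the original is dead
-- # code: it returns the same default "Tactical").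
-- KEYWORD_TO_CATEGORY = [
--     ("partner", "Strategic"), ("strategy", "Strategic"), ("approach", "Strategic"),
--     ("direction", "Strategic"), ("vision", "Strategic"), ("goal", "Strategic"),
--     ("feature", "Product"), ("product", "Product"), ("build", "Product"),
--     ("develop", "Product"), ("design", "Product"), ("functionality", "Product"),
--     ("hire", "Resource Allocation"), ("budget", "Resource Allocation"),
--     ("spend", "Resource Allocation"), ("invest", "Resource Allocation"),
--     ("resource", "Resource Allocation"), ("allocate", "Resource Allocation"),
--     ("cost", "Resource Allocation"),
--     ("process", "Process"), ("workflow", "Process"), ("procedure", "Process"),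
--     ("system", "Process"), ("how we", "Process"),
-- ]
--
-- PRIORITY = ["Strategic", "Product", "Resource Allocation", "Process"]
--
--
-- def _categorize_decision(decision_text: str, meeting_info: dict) -> str:
--     """Categorize the decision type."""
--     text = decision_text.lower()
--     seen = set()
--     for i in range(len(text)):
--         for kw, cat in KEYWORD_TO_CATEGORY:
--             if text.startswith(kw, i):
--                 seen.add(cat)
--     for cat in PRIORITY:
--         if cat in seen:
--             return cat
--     return "Tactical"
-- ===== Notes on version B (the rewrite author's own statement) =====
-- stated objective: alternative
-- what changed: Instead of A's cascade of per-category any(substring in text) branches, B makes one left-to-right scan over text positions matching all keywords via startswith into a set of seen categories, then picks the highest-priority category seen (A's dead meeting_types/'sales' branch, which returns the same default, is dropped).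
import Mathlib
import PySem

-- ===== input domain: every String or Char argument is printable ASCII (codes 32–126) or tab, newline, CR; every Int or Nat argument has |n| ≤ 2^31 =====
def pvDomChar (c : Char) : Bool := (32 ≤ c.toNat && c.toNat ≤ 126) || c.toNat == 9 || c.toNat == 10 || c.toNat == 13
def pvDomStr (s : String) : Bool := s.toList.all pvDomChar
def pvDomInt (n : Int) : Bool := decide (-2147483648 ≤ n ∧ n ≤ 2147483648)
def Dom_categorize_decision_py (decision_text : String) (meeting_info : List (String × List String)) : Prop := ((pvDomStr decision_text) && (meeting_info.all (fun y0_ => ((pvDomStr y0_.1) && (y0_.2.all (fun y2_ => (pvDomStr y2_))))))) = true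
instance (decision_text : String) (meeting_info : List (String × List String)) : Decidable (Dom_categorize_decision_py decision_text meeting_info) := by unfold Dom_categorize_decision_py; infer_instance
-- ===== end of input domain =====

-- B replaces A's cascade of per-category substring tests by one left-to-right scan over
-- text positions collecting the set of matched categories, then a priority pick; same results.

-- ===== PORT A =====
def categorize_decision_py (decision_text : String) (meeting_info : List (String × List String)) : String :=
  let text_lower := PySem.Str.lower decision_text
  let meeting_types := PySem.Dict.getD (PySem.Dict.mk meeting_info) "meeting_types" []
  if ["partner", "strategy", "approach", "direction", "vision", "goal"].any
      (fun word => PySem.Str.isIn word text_lower) then "Strategic"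
  else if ["feature", "product", "build", "develop", "design", "functionality"].any
      (fun word => PySem.Str.isIn word text_lower) then "Product"
  else if ["hire", "budget", "spend", "invest", "resource", "allocate", "cost"].any
      (fun word => PySem.Str.isIn word text_lower) then "Resource Allocation"
  else if ["process", "workflow", "procedure", "system", "how we"].any
      (fun word => PySem.Str.isIn word text_lower) then "Process"
  else if meeting_types.contains "sales" then "Tactical"
  else "Tactical"

-- ===== PORT B =====
def pvKeywordToCategory : List (String × String) :=
  [("partner", "Strategic"), ("strategy", "Strategic"), ("approach", "Strategic"),
   ("direction", "Strategic"), ("vision", "Strategic"), ("goal", "Strategic"),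
   ("feature", "Product"), ("product", "Product"), ("build", "Product"),
   ("develop", "Product"), ("design", "Product"), ("functionality", "Product"),
   ("hire", "Resource Allocation"), ("budget", "Resource Allocation"),
   ("spend", "Resource Allocation"), ("invest", "Resource Allocation"),
   ("resource", "Resource Allocation"), ("allocate", "Resource Allocation"),
   ("cost", "Resource Allocation"),
   ("process", "Process"), ("workflow", "Process"), ("procedure", "Process"),
   ("system", "Process"), ("how we", "Process")]

def pvPriority : List String := ["Strategic", "Product", "Resource Allocation", "Process"]

-- the inner 'for kw, cat in KEYWORD_TO_CATEGORY: if text.startswith(kw, i): seen.add(cat)'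
-- (text.startswith(kw, i) is exactly startswith of the i-th suffix, here the current list tail)
def pvStep (suffix : List Char) (seen : PySem.Set String) : PySem.Set String :=
  pvKeywordToCategory.foldl
    (fun s p => if PySem.Chars.startswith suffix p.1.toList then PySem.Set.add s p.2 else s) seen

-- the outer 'for i in range(len(text))' as structural recursion over the suffixes of text
def pvScan : List Char → PySem.Set String → PySem.Set String
  | [], seen => seen
  | c :: rest, seen => pvScan rest (pvStep (c :: rest) seen)

-- 'for cat in PRIORITY: if cat in seen: return cat' / 'return "Tactical"'
def pvPick (seen : PySem.Set String) : List String → String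
  | [] => "Tactical"
  | cat :: rest => if PySem.Set.contains seen cat then cat else pvPick seen rest

def categorize_decision_py_alt (decision_text : String) (_meeting_info : List (String × List String)) : String :=
  let text := PySem.Str.lower decision_text
  pvPick (pvScan text.toList PySem.Set.empty) pvPriority

-- ===== PRECONDITION & SPEC =====
def Spec_categorize_decision_py (decision_text : String) (meeting_info : List (String × List String)) (out : String) : Prop := out = categorize_decision_py_alt decision_text meeting_info
instance (decision_text : String) (meeting_info : List (String × List String)) (out : String) : Decidable (Spec_categorize_decision_py decision_text meeting_info out) := by unfold Spec_categorize_decision_py; infer_instance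

-- ===== CLAIM (what is proved, stated in full; the proofs are below) =====
def Claim_equal_categorize_decision_py : Prop := ∀ (decision_text : String) (meeting_info : List (String × List String)), Dom_categorize_decision_py decision_text meeting_info → Spec_categorize_decision_py decision_text meeting_info (categorize_decision_py decision_text meeting_info)

-- ===== LEMMAS AND PROOFS =====

-- membership after the inner keyword fold
lemma mem_foldl_add (kws : List (String × String)) (suffix : List Char)
    (seen : PySem.Set String) (x : String) :
    x ∈ kws.foldl
        (fun s p => if PySem.Chars.startswith suffix p.1.toList then PySem.Set.add s p.2 else s) seen ↔
      x ∈ seen ∨ ∃ p ∈ kws, PySem.Chars.startswith suffix p.1.toList = true ∧ p.2 = x := by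
  induction kws generalizing seen with
  | nil => simp
  | cons hd tl ih =>
    simp only [List.foldl_cons]
    by_cases h : PySem.Chars.startswith suffix hd.1.toList = true
    · rw [if_pos h, ih, PySem.Set.mem_add]
      constructor
      · rintro (⟨hs | he⟩ | ⟨p, hp, hsw, hx⟩)
        · exact Or.inl hs
        · exact Or.inr ⟨hd, List.mem_cons_self, h, he.symm⟩
        · exact Or.inr ⟨p, List.mem_cons_of_mem _ hp, hsw, hx⟩
      · rintro (hs | ⟨p, hp, hsw, hx⟩)
        · exact Or.inl (Or.inl hs)
        · rcases List.mem_cons.mp hp with rfl | hp'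
          · exact Or.inl (Or.inr hx.symm)
          · exact Or.inr ⟨p, hp', hsw, hx⟩
    · rw [if_neg h, ih]
      constructor
      · rintro (hs | ⟨p, hp, hsw, hx⟩)
        · exact Or.inl hs
        · exact Or.inr ⟨p, List.mem_cons_of_mem _ hp, hsw, hx⟩
      · rintro (hs | ⟨p, hp, hsw, hx⟩)
        · exact Or.inl hs
        · rcases List.mem_cons.mp hp with rfl | hp'
          · exact absurd hsw h
          · exact Or.inr ⟨p, hp', hsw, hx⟩

lemma mem_pvStep (suffix : List Char) (seen : PySem.Set String) (x : String) :
    x ∈ pvStep suffix seen ↔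
      x ∈ seen ∨ ∃ p ∈ pvKeywordToCategory, PySem.Chars.startswith suffix p.1.toList = true ∧ p.2 = x := by
  exact mem_foldl_add _ _ _ _

-- membership after the whole scan: some suffix starts with a keyword of category x
lemma mem_pvScan (l : List Char) (seen : PySem.Set String) (x : String) :
    x ∈ pvScan l seen ↔
      x ∈ seen ∨ ∃ j, ∃ p ∈ pvKeywordToCategory,
        PySem.Chars.startswith (l.drop j) p.1.toList = true ∧ p.2 = x := by
  induction l generalizing seen with
  | nil =>
    simp only [pvScan, List.drop_nil]
    constructor
    · exact Or.inl
    · rintro (hs | ⟨j, p, hp, hsw, hx⟩)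
      · exact hs
      · -- startswith [] kw is true only for kw = [], but no keyword is empty
        have : p.1.toList = [] := by
          have := (PySem.Chars.startswith_iff _ _).mp hsw
          exact List.prefix_nil.mp this
        fin_cases hp <;> simp_all
  | cons c rest ih =>
    simp only [pvScan]
    rw [ih, mem_pvStep]
    constructor
    · rintro ((hs | ⟨p, hp, hsw, hx⟩) | ⟨j, p, hp, hsw, hx⟩)
      · exact Or.inl hs
      · exact Or.inr ⟨0, p, hp, by simpa using hsw, hx⟩
      · exact Or.inr ⟨j + 1, p, hp, by simpa using hsw, hx⟩
    · rintro (hs | ⟨j, p, hp, hsw, hx⟩)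
      · exact Or.inl (Or.inl hs)
      · cases j with
        | zero => exact Or.inl (Or.inr ⟨p, hp, by simpa using hsw, hx⟩)
        | succ k => exact Or.inr ⟨k, p, hp, by simpa using hsw, hx⟩

-- category x is seen iff one of its keywords occurs as a substring
lemma mem_pvScan_isIn (l : List Char) (x : String) :
    x ∈ pvScan l PySem.Set.empty ↔
      ∃ p ∈ pvKeywordToCategory, PySem.Chars.isIn p.1.toList l = true ∧ p.2 = x := by
  rw [mem_pvScan]
  constructor
  · rintro (hs | ⟨j, p, hp, hsw, hx⟩)
    · simp [PySem.Set.empty] at hs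
    · refine ⟨p, hp, ?_, hx⟩
      exact (PySem.Chars.exists_prefix_drop_iff_isIn _ _).mp
        ⟨j, (PySem.Chars.startswith_iff _ _).mp hsw⟩
  · rintro ⟨p, hp, hin, hx⟩
    obtain ⟨j, hj⟩ := (PySem.Chars.exists_prefix_drop_iff_isIn _ _).mpr hin
    exact Or.inr ⟨j, p, hp, (PySem.Chars.startswith_iff _ _).mpr hj, hx⟩

-- one helper per category: seen-membership after the scan ↔ A's any(substring) test
lemma seen_iff_any (t : String) (cat : String)
    (ws : List String)
    (hws : ∀ p ∈ pvKeywordToCategory, p.2 = cat ↔ p.1 ∈ ws)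
    (hsub : ∀ w ∈ ws, ∃ p ∈ pvKeywordToCategory, p.1 = w ∧ p.2 = cat) :
    (cat ∈ pvScan t.toList PySem.Set.empty) ↔
      (ws.any (fun w => PySem.Str.isIn w t) = true) := by
  rw [mem_pvScan_isIn]
  simp only [List.any_eq_true]
  constructor
  · rintro ⟨p, hp, hin, hx⟩
    refine ⟨p.1, (hws p hp).mp hx, ?_⟩
    simpa using hin
  · rintro ⟨w, hw, hin⟩
    obtain ⟨p, hp, h1, h2⟩ := hsub w hw
    exact ⟨p, hp, by simpa [h1] using hin, h2⟩

-- ===== VERDICT (by name: the statement is the Claim_ definition above) =====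
theorem categorize_decision_py_spec : Claim_equal_categorize_decision_py := by
  intro decision_text meeting_info _
  unfold Spec_categorize_decision_py categorize_decision_py categorize_decision_py_alt
  set t := PySem.Str.lower decision_text with ht
  have hS := seen_iff_any t "Strategic" ["partner", "strategy", "approach", "direction", "vision", "goal"] (by decide) (by decide)
  have hP := seen_iff_any t "Product" ["feature", "product", "build", "develop", "design", "functionality"] (by decide) (by decide)
  have hR := seen_iff_any t "Resource Allocation" ["hire", "budget", "spend", "invest", "resource", "allocate", "cost"] (by decide) (by decide)
  have hW := seen_iff_any t "Process" ["process", "workflow", "procedure", "system", "how we"] (by decide) (by decide)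
  have hc : ∀ (s : PySem.Set String) (x : String), PySem.Set.contains s x = true ↔ x ∈ s := by
    intro s x; simp [PySem.Set.contains]
  have e1 := (hc (pvScan t.toList PySem.Set.empty) "Strategic").trans hS
  have e2 := (hc (pvScan t.toList PySem.Set.empty) "Product").trans hP
  have e3 := (hc (pvScan t.toList PySem.Set.empty) "Resource Allocation").trans hR
  have e4 := (hc (pvScan t.toList PySem.Set.empty) "Process").trans hW
  simp only [pvPriority, pvPick]
  split_ifs <;> simp_all
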